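-- pv_equiv track=rewrite | github.com/GuilhermeGabriel/GuilhermeGabriel-PythonStudies | python_bases_exercicies/main.py | octal_to_bin
-- ===== SOURCE A (Python) =====
-- def decimal_to_bin(num):
--     num_list = []
--
--     while int(num) >= 2:
--         rest = int(num) % 2
--         num = int(num) // 2
--
--         num_list.insert(0, rest)
--
--     num_list.insert(0, num)  # num_list é um vetor com os algarismos do resultado
--     num_value = ''.join(list(map(str, num_list)))  # Transforma cada algarismo em uma
--     # string e depois junta e trasforma essa string um int
--
--     return int(num_value)
--
-- def get_num_hex(alga):
--     alga_hex_list = ['A', 'B', 'C', 'D', 'E', 'F']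
--     num_hex_list = [10, 11, 12, 13, 14, 15]
--
--     if alga.upper() in alga_hex_list:
--         return num_hex_list[alga_hex_list.index(alga.upper())]
--     else:
--         return int(alga)
--
-- def octal_to_bin(num):
--     block = []
--
--     for i in range(len(num) - 1, -1, -1):
--
--         block_in_bin = list(str(
--             decimal_to_bin(get_num_hex(num[i]))
--         ))
--
--         while len(block_in_bin) < 3:
--             block_in_bin.insert(0, '0')
--
--         block.insert(0, block_in_bin)
--
--     return block
-- ===== SOURCE B (Python) =====
-- def octal_to_bin(num):
--     return [list(format("0123456789abcdef".index(c.lower()), "03b")) for c in num]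
-- ===== Notes on version B (the rewrite author's own statement) =====
-- stated objective: simpler
-- what changed: B replaces A's repeated-division binary conversion, string round-trip through int(), and the manual front-padding and insert(0) loops with a single forward comprehension: hex value via charset index and the block via 3-bit zero-padded binary formatting.
import Mathlib
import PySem

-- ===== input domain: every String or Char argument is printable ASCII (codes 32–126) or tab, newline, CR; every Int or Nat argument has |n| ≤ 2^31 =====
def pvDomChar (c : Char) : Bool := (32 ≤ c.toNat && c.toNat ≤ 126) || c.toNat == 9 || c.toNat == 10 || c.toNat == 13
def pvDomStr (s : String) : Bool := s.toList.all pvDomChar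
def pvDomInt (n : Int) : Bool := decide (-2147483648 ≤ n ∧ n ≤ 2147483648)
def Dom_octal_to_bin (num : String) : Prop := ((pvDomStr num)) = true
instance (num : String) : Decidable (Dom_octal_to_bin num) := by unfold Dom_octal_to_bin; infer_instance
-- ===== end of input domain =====

set_option maxRecDepth 8000

-- B replaces A's repeated-division binary conversion and manual front-padding loop with a
-- direct per-character map: hex value by charset index, block by fixed-width binary formatting (objective: simpler).


-- ===== PORT A =====
-- while int(num) >= 2: rest = num % 2; num = num // 2; num_list.insert(0, rest) — fueled, fuel ≥ num.toNat+1 never exhausts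
def dtbLoop : Nat → Int → List Int → List Int
  | 0, num, acc => num :: acc
  | fuel + 1, num, acc =>
      if 2 ≤ num then dtbLoop fuel (PySem.Int.floordiv num 2) (PySem.Int.mod num 2 :: acc)
      else num :: acc

def decimal_to_bin (num : Int) : Option Int :=
  let num_list := dtbLoop (num.toNat + 1) num []
  PySem.Int.ofStr? (PySem.Str.join "" (num_list.map PySem.Int.toStr))

def get_num_hex (alga : String) : Option Int :=
  let alga_hex_list : List String := ["A", "B", "C", "D", "E", "F"]
  let num_hex_list : List Int := [10, 11, 12, 13, 14, 15]
  if alga_hex_list.contains (PySem.Str.upper alga) then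
    (PySem.List.index? alga_hex_list (PySem.Str.upper alga)).bind (fun i => num_hex_list[i]?)
  else
    PySem.Int.ofStr? alga

-- while len(block_in_bin) < 3: block_in_bin.insert(0, '0') — fuel 3 suffices (each step grows length by 1)
def padLoop : Nat → List String → List String
  | 0, l => l
  | f + 1, l => if l.length < 3 then padLoop f ("0" :: l) else l

-- one iteration body: list(str(decimal_to_bin(get_num_hex(num[i])))) padded (none = a raise, unreachable under Pre_)
def blockA (ch : Char) : List String :=
  match (get_num_hex (String.mk [ch])).bind decimal_to_bin with
  | some n => padLoop 3 ((PySem.Int.toStr n).toList.map (fun c => String.mk [c]))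
  | none => []

def octal_to_bin (num : String) : List (List String) :=
  (PySem.List.pyRange (PySem.Str.len num - 1) (-1) (-1)).foldl
    (fun block i =>
      match PySem.Str.pyGet? num i with
      | some ch => blockA ch :: block
      | none => block) []

-- ===== PORT B =====
-- binary digits of n (fueled hand port of format(n, 'b'); fuel ≥ n+1 never exhausts)
def binChars : Nat → Nat → List Char
  | 0, _ => []
  | f + 1, n =>
      if n < 2 then [Char.ofNat (48 + n)]
      else binChars f (n / 2) ++ [Char.ofNat (48 + n % 2)]

-- list(format(v, '03b')): binary digits left-padded with '0' to minimum width 3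
def fmt03b (v : Nat) : List String :=
  let ds := binChars (v + 1) v
  (List.replicate (3 - ds.length) '0' ++ ds).map (fun c => String.mk [c])

def octal_to_bin_alt (num : String) : List (List String) :=
  num.toList.map (fun c =>
    match PySem.List.index? "0123456789abcdef".toList (PySem.Chars.lowerChar c) with
    | some v => fmt03b v
    | none => [])

-- ===== PRECONDITION & SPEC =====
def hexChars : List Char := ['0','1','2','3','4','5','6','7','8','9','A','B','C','D','E','F','a','b','c','d','e','f']
-- Pre_: every character is a hex digit; on any other character both A and B raise ValueError.
def Pre_octal_to_bin (num : String) : Prop :=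
  (num.toList.all (fun c => hexChars.contains c)) = true
instance (num : String) : Decidable (Pre_octal_to_bin num) := by unfold Pre_octal_to_bin; infer_instance
def pvWitness_octal_to_bin : String := "7F0"

def Spec_octal_to_bin (num : String) (out : List (List String)) : Prop := out = octal_to_bin_alt num
instance (num : String) (out : List (List String)) : Decidable (Spec_octal_to_bin num out) := by unfold Spec_octal_to_bin; infer_instance

-- ===== CLAIM (what is proved, stated in full; the proofs are below) =====
def Claim_equal_octal_to_bin : Prop := ∀ (num : String), Dom_octal_to_bin num → Pre_octal_to_bin num → Spec_octal_to_bin num (octal_to_bin num)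

-- ===== LEMMAS AND PROOFS =====

-- each hex character yields the same block on both sides
theorem blocks_agree : ∀ c ∈ hexChars,
    blockA c = (match PySem.List.index? "0123456789abcdef".toList (PySem.Chars.lowerChar c) with
                | some v => fmt03b v
                | none => []) := by
  intro c hc
  simp only [hexChars] at hc
  fin_cases hc <;> decide

-- A's countdown index loop with insert(0, …) builds the forward per-character map
theorem fold_countdown (ls : List Char) (init : List (List String)) :
    (PySem.List.pyRange ((ls.length : Int) - 1) (-1) (-1)).foldl
      (fun block i =>
        match PySem.List.pyGet? ls i with
        | some ch => blockA ch :: block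
        | none => block) init
    = ls.map blockA ++ init := by
  induction ls using List.reverseRecOn generalizing init with
  | nil => rw [PySem.List.pyRange_neg_one_eq_nil (by simp)]; simp
  | append_singleton ls c ih =>
      have hlen : ((ls ++ [c]).length : Int) - 1 = (ls.length : Int) := by simp
      rw [hlen, PySem.List.pyRange_neg_one_cons (by omega), List.foldl_cons]
      have hget : PySem.List.pyGet? (ls ++ [c]) (ls.length : Int) = some c := by
        rw [PySem.List.pyGet?_natCast]; simp
      rw [hget]
      have hcongr :
          (PySem.List.pyRange ((ls.length : Int) - 1) (-1) (-1)).foldl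
            (fun block i =>
              match PySem.List.pyGet? (ls ++ [c]) i with
              | some ch => blockA ch :: block
              | none => block) (blockA c :: init)
          = (PySem.List.pyRange ((ls.length : Int) - 1) (-1) (-1)).foldl
            (fun block i =>
              match PySem.List.pyGet? ls i with
              | some ch => blockA ch :: block
              | none => block) (blockA c :: init) := by
        apply PySem.List.foldl_congr_mem
        intro b i hi
        have hmem := (PySem.List.mem_pyRange_neg_one).1 hi
        have h0 : 0 ≤ i := by omega
        have h1 : i < (ls.length : Int) := by omega
        obtain ⟨k, rfl⟩ := Int.eq_ofNat_of_zero_le h0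
        rw [PySem.List.pyGet?_natCast, PySem.List.pyGet?_natCast,
            List.getElem?_append_left (by exact_mod_cast h1)]
      rw [hcongr, ih]
      simp

-- ===== VERDICT (by name: the statement is the Claim_ definition above) =====
theorem octal_to_bin_spec : Claim_equal_octal_to_bin := by
  intro num _hdom hpre
  unfold Spec_octal_to_bin octal_to_bin octal_to_bin_alt
  simp only [PySem.Str.pyGet?_eq, PySem.Chars.pyGet?_eq_listPyGet?, PySem.Str.len_eq]
  rw [fold_countdown num.toList []]
  rw [List.append_nil]
  refine List.map_congr_left (fun c hc => blocks_agree c ?_)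
  have := List.all_eq_true.mp hpre c hc
  simpa using this
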